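-- pv_equiv track=rewrite | github.com/fpl-xylotron/frontiers-in-plant-science-2020a | xylotron/xylo/apps/ref/xylo_ref_ui.py | _sanitize_species
-- ===== SOURCE A (Python) =====
-- def _sanitize_species(species: str) -> str:
--     sspecies = ""
--     for c in species.strip():
--         if c.isalnum() and c != "_":
--             sspecies += c
--         else:
--             sspecies += "-"
--     tkns = [t.lower() for t in sspecies.split("-") if t.strip()]
--     sspecies = "-".join(tkns)
--     return sspecies
-- ===== SOURCE B (Python) =====
-- def _sanitize_species(species: str) -> str:
--     tokens = []
--     run = ""
--     for c in species:
--         if c.isalnum():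
--             run += c.lower()
--         elif run:
--             tokens.append(run)
--             run = ""
--     if run:
--         tokens.append(run)
--     return "-".join(tokens)
-- ===== Notes on version B (the rewrite author's own statement) =====
-- stated objective: simpler
-- what changed: B collects maximal alphanumeric runs in a single pass with a run accumulator instead of building A's intermediate hyphen-substituted string and then split/strip-filter/lower/join; no strip is needed since whitespace is never alphanumeric.
import Mathlib
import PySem

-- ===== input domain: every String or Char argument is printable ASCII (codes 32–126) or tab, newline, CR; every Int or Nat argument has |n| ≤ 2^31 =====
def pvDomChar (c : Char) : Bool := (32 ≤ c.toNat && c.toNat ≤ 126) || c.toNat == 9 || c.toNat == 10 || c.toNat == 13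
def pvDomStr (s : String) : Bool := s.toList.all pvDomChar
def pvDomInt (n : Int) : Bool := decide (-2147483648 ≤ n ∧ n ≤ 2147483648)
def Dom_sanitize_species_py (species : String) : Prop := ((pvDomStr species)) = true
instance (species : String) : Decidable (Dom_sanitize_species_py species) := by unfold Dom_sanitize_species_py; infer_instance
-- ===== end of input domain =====

-- B builds the maximal-alphanumeric-run tokens in one pass instead of A's substitute/split/filter/join pipeline; same result, simpler.

-- ===== PORT A =====
def sanitize_species_py (species : String) : String :=
  let sspecies : List Char :=
    (PySem.Str.strip species).toList.foldl
      (fun acc c => acc ++ (if PySem.Chars.isalnum c && c != '_' then [c] else ['-'])) []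
  let tkns : List (List Char) :=
    ((PySem.Chars.splitOn sspecies ['-']).filter (fun t => !(PySem.Chars.strip t).isEmpty)).map PySem.Chars.lower
  String.mk (PySem.Chars.join ['-'] tkns)

-- ===== PORT B =====
def sanitize_species_py_alt (species : String) : String :=
  let st := species.toList.foldl
    (fun (st : List (List Char) × List Char) c =>
      if PySem.Chars.isalnum c then (st.1, st.2 ++ [PySem.Chars.lowerChar c])
      else if st.2.isEmpty then st
      else (st.1 ++ [st.2], []))
    ([], [])
  let tokens := if st.2.isEmpty then st.1 else st.1 ++ [st.2]
  String.mk (PySem.Chars.join ['-'] tokens)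

-- ===== PRECONDITION & SPEC =====
def Spec_sanitize_species_py (species : String) (out : String) : Prop := out = sanitize_species_py_alt species
instance (species : String) (out : String) : Decidable (Spec_sanitize_species_py species out) := by unfold Spec_sanitize_species_py; infer_instance

-- ===== CLAIM (what is proved, stated in full; the proofs are below) =====
def Claim_equal_sanitize_species_py : Prop := ∀ (species : String), Dom_sanitize_species_py species → Spec_sanitize_species_py species (sanitize_species_py species)

-- ===== LEMMAS AND PROOFS =====

-- the maximal alphanumeric runs of a character list
def pvToks : List Char → List (List Char)
  | [] => []
  | c :: l =>
    if PySem.Chars.isalnum c then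
      (c :: l.takeWhile PySem.Chars.isalnum) :: pvToks (l.dropWhile PySem.Chars.isalnum)
    else pvToks l
termination_by l => l.length
decreasing_by
  · exact Nat.lt_succ_of_le (List.length_dropWhile_le _ _)
  · simp

-- splitting on a single separator char, directly recursive
def pvSplit : List Char → List (List Char)
  | [] => [[]]
  | c :: l => if c = '-' then [] :: pvSplit l else (pvSplit l).modifyHead (c :: ·)

theorem pvSplit_ne_nil (l : List Char) : pvSplit l ≠ [] := by
  cases l with
  | nil => simp [pvSplit]
  | cons c l =>
    simp only [pvSplit]
    split
    · simp
    · cases h : pvSplit l with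
      | nil => exact absurd h (pvSplit_ne_nil l)
      | cons a t => simp

theorem pv_go_spec (fuel : Nat) (l cur : List Char) (hacc : List (List Char))
    (h : l.length < fuel) :
    PySem.Chars.splitOn.go ['-'] fuel l cur hacc =
      hacc.reverse ++ (pvSplit l).modifyHead (cur.reverse ++ ·) := by
  induction fuel generalizing l cur hacc with
  | zero => exact absurd h (by omega)
  | succ f ih =>
    cases l with
    | nil => simp [PySem.Chars.splitOn.go, pvSplit]
    | cons c rest =>
      by_cases hc : c = '-'
      · subst hc
        have hpre : List.isPrefixOf ['-'] ('-' :: rest) = true := by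
          simp [List.isPrefixOf]
        simp only [PySem.Chars.splitOn.go, hpre, if_pos]
        have hdrop : List.drop (['-'] : List Char).length ('-' :: rest) = rest := rfl
        rw [hdrop, ih rest [] (cur.reverse :: hacc) (by simpa using Nat.lt_of_succ_lt_succ h)]
        simp only [pvSplit, if_pos rfl, List.reverse_cons, List.reverse_nil, List.nil_append,
          List.modifyHead_cons, List.append_assoc, List.singleton_append]
        cases pvSplit rest <;> simp
      · have hp : List.isPrefixOf ['-'] (c :: rest) = false := by
          simp [List.isPrefixOf]
          intro h'; exact absurd h'.symm hc
        simp only [PySem.Chars.splitOn.go, hp]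
        rw [ih rest (c :: cur) hacc (by simpa using Nat.lt_of_succ_lt_succ h)]
        simp [pvSplit, hc, List.modifyHead_modifyHead, Function.comp_def]

theorem pv_splitOn_eq (l : List Char) : PySem.Chars.splitOn l ['-'] = pvSplit l := by
  unfold PySem.Chars.splitOn
  rw [pv_go_spec (l.length + 1) l [] [] (by omega)]
  cases h : pvSplit l with
  | nil => exact absurd h (pvSplit_ne_nil l)
  | cons a t => simp

theorem pv_alnum_not_space (c : Char) (h : PySem.Chars.isalnum c = true) :
    PySem.Chars.isspace c = false := by
  simp only [PySem.Chars.isalnum, PySem.Chars.isalpha, PySem.Chars.isupper, PySem.Chars.islower,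
    PySem.Chars.isdigit, Bool.or_eq_true, Bool.and_eq_true, decide_eq_true_eq, Char.le_def,
    UInt32.le_iff_toNat_le] at h
  simp only [PySem.Chars.isspace]
  simp only [Bool.or_eq_false_iff, Bool.and_eq_false_iff, decide_eq_false_iff_not]
  simp only [Char.toNat, show 'A'.val.toNat = 65 from rfl, show 'Z'.val.toNat = 90 from rfl,
    show 'a'.val.toNat = 97 from rfl, show 'z'.val.toNat = 122 from rfl,
    show '0'.val.toNat = 48 from rfl, show '9'.val.toNat = 57 from rfl] at *
  omega

theorem pv_alnum_ne_underscore (c : Char) (h : PySem.Chars.isalnum c = true) : c ≠ '_' := by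
  intro hc; subst hc; exact absurd h (by decide)

theorem pv_strip_of_alnum (t : List Char) (h : ∀ c ∈ t, PySem.Chars.isalnum c = true) :
    PySem.Chars.strip t = t := by
  have hs : ∀ c ∈ t, PySem.Chars.isspace c = false := fun c hc => pv_alnum_not_space c (h c hc)
  have h1 : t.dropWhile PySem.Chars.isspace = t := by
    cases t with
    | nil => rfl
    | cons a l => simp [List.dropWhile_cons, hs a (by simp)]
  have h2 : t.reverse.dropWhile PySem.Chars.isspace = t.reverse := by
    cases ht : t.reverse with
    | nil => rfl
    | cons a l =>
      have : a ∈ t := by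
        have : a ∈ t.reverse := by simp [ht]
        simpa using this
      simp [List.dropWhile_cons, hs a this]
  simp [PySem.Chars.strip, PySem.Chars.lstrip, PySem.Chars.rstrip, h1, h2]

-- the substitution A applies to each character
def pvSub (c : Char) : List Char := if PySem.Chars.isalnum c && c != '_' then [c] else ['-']

theorem pvSub_eq (c : Char) :
    pvSub c = if PySem.Chars.isalnum c then [c] else ['-'] := by
  unfold pvSub
  by_cases h : PySem.Chars.isalnum c = true
  · simp [h, pv_alnum_ne_underscore c h]
  · simp [Bool.eq_false_iff.mpr h]

-- A's filtered split equals the maximal-run decomposition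
theorem pv_filter_split (n : Nat) : ∀ l : List Char, l.length ≤ n →
    ((pvSplit (l.flatMap pvSub)).filter (fun t => !(PySem.Chars.strip t).isEmpty) = pvToks l) ∧
    (∀ pre : List Char, pre ≠ [] → (∀ c ∈ pre, PySem.Chars.isalnum c = true) →
      ((pvSplit (l.flatMap pvSub)).modifyHead (pre ++ ·)).filter (fun t => !(PySem.Chars.strip t).isEmpty) =
        (pre ++ l.takeWhile PySem.Chars.isalnum) :: pvToks (l.dropWhile PySem.Chars.isalnum)) := by
  induction n with
  | zero =>
    intro l hl
    have : l = [] := List.eq_nil_of_length_eq_zero (Nat.le_zero.mp hl)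
    subst this
    constructor
    · simp [pvSplit, pvToks, PySem.Chars.strip, PySem.Chars.lstrip, PySem.Chars.rstrip]
    · intro pre hne hal
      simp [pvSplit, pvToks, pv_strip_of_alnum pre hal, hne]
  | succ n ih =>
    intro l hl
    cases l with
    | nil => exact ih [] (by simp)
    | cons c l =>
      have hlen : l.length ≤ n := by simpa using Nat.le_of_succ_le_succ (by simpa using hl)
      by_cases hc : PySem.Chars.isalnum c = true
      · have hcd : c ≠ '-' := by
          intro hx; subst hx; exact absurd hc (by decide)
        have hsplit : pvSplit (c :: l.flatMap pvSub) =
            (pvSplit (l.flatMap pvSub)).modifyHead (c :: ·) := by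
          simp [pvSplit, hcd]
        constructor
        · rw [List.flatMap_cons, pvSub_eq, if_pos hc, List.singleton_append, hsplit]
          have h2 := (ih l hlen).2 [c] (by simp)
            (by intro x hx; simp at hx; subst hx; exact hc)
          simp only [List.singleton_append] at h2
          rw [h2]
          simp [pvToks, hc]
        · intro pre hne hal
          rw [List.flatMap_cons, pvSub_eq, if_pos hc, List.singleton_append, hsplit,
            List.modifyHead_modifyHead]
          have hcomp : ((pre ++ ·) ∘ (c :: ·)) = ((pre ++ [c]) ++ ·) := by
            funext x; simp
          rw [hcomp]
          have hrec := (ih l hlen).2 (pre ++ [c]) (by simp)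
            (by intro x hx
                rcases List.mem_append.mp hx with h | h
                · exact hal x h
                · simp at h; subst h; exact hc)
          rw [hrec]
          simp [List.takeWhile_cons, List.dropWhile_cons, hc]
      · have hcf : PySem.Chars.isalnum c = false := Bool.eq_false_iff.mpr hc
        have hsplit : pvSplit ('-' :: l.flatMap pvSub) = [] :: pvSplit (l.flatMap pvSub) := by
          simp [pvSplit]
        constructor
        · rw [List.flatMap_cons, pvSub_eq, if_neg (by simp [hcf]), List.singleton_append, hsplit,
            List.filter_cons]
          simp only [show (!(PySem.Chars.strip ([] : List Char)).isEmpty) = false from rfl,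
            Bool.false_eq_true, if_false]
          rw [(ih l hlen).1]
          simp [pvToks, hcf]
        · intro pre hne hal
          rw [List.flatMap_cons, pvSub_eq, if_neg (by simp [hcf]), List.singleton_append, hsplit,
            List.modifyHead_cons, List.filter_cons, List.append_nil]
          rw [pv_strip_of_alnum pre hal]
          have hpe : pre.isEmpty = false := by
            cases pre with
            | nil => exact absurd rfl hne
            | cons a t => rfl
          simp only [hpe, Bool.not_false, if_true]
          rw [(ih l hlen).1]
          simp [pvToks, List.takeWhile_cons, List.dropWhile_cons, hcf, hne]

-- pvToks ignores surrounding whitespace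
theorem pv_toks_space_cons (c : Char) (l : List Char) (h : PySem.Chars.isspace c = true) :
    pvToks (c :: l) = pvToks l := by
  have hcf : PySem.Chars.isalnum c = false := by
    cases hh : PySem.Chars.isalnum c
    · rfl
    · rw [pv_alnum_not_space c hh] at h; exact absurd h (by simp)
  simp [pvToks, hcf]

theorem pv_toks_all_space (l : List Char) (h : ∀ c ∈ l, PySem.Chars.isspace c = true) :
    pvToks l = [] := by
  induction l with
  | nil => simp [pvToks]
  | cons c l ih =>
    rw [pv_toks_space_cons c l (h c (by simp))]
    exact ih (fun c hc => h c (List.mem_cons_of_mem _ hc))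

theorem pv_toks_append_space (n : Nat) : ∀ l suf : List Char, l.length ≤ n →
    (∀ c ∈ suf, PySem.Chars.isspace c = true) → pvToks (l ++ suf) = pvToks l := by
  induction n with
  | zero =>
    intro l suf hl hs
    have : l = [] := List.eq_nil_of_length_eq_zero (Nat.le_zero.mp hl)
    subst this
    simpa [pvToks] using pv_toks_all_space suf hs
  | succ n ih =>
    intro l suf hl hs
    cases l with
    | nil => simpa [pvToks] using pv_toks_all_space suf hs
    | cons c l =>
      have hlen : l.length ≤ n := by simpa using hl
      by_cases hc : PySem.Chars.isalnum c = true
      · have htw : (l ++ suf).takeWhile PySem.Chars.isalnum = l.takeWhile PySem.Chars.isalnum ∧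
            pvToks ((l ++ suf).dropWhile PySem.Chars.isalnum) =
              pvToks (l.dropWhile PySem.Chars.isalnum) := by
          rw [List.takeWhile_append, List.dropWhile_append]
          by_cases hall : (l.takeWhile PySem.Chars.isalnum).length = l.length
          · have hle : l.dropWhile PySem.Chars.isalnum = [] := by
              have h2 := congrArg List.length
                (List.takeWhile_append_dropWhile (p := PySem.Chars.isalnum) (l := l))
              simp only [List.length_append] at h2
              exact List.eq_nil_of_length_eq_zero (by omega)
            have htsuf : suf.takeWhile PySem.Chars.isalnum = [] := by
              cases suf with
              | nil => rfl
              | cons a s =>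
                have hsp := hs a (by simp)
                have : PySem.Chars.isalnum a = false := by
                  cases hh : PySem.Chars.isalnum a
                  · rfl
                  · rw [pv_alnum_not_space a hh] at hsp; exact absurd hsp (by simp)
                simp [List.takeWhile_cons, this]
            have htl : l.takeWhile PySem.Chars.isalnum = l := by
              have h3 := List.takeWhile_append_dropWhile (p := PySem.Chars.isalnum) (l := l)
              rw [hle, List.append_nil] at h3
              exact h3
            constructor
            · simp [hall, htsuf, htl]
            · rw [if_pos (by simp [hle]), hle]
              rw [pv_toks_all_space (suf.dropWhile PySem.Chars.isalnum)
                (fun c' hc' => hs c' ((List.dropWhile_sublist _).subset hc'))]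
              simp [pvToks]
          · have hld : l.dropWhile PySem.Chars.isalnum ≠ [] := by
              intro hx
              have h3 := List.takeWhile_append_dropWhile (p := PySem.Chars.isalnum) (l := l)
              rw [hx, List.append_nil] at h3
              exact hall (by rw [h3])
            constructor
            · rw [if_neg hall]
            · rw [if_neg (by simpa [List.isEmpty_iff] using hld)]
              exact ih (l.dropWhile PySem.Chars.isalnum) suf
                (le_trans (List.length_dropWhile_le _ _) hlen) hs
        simp only [List.cons_append, pvToks, hc, if_pos, htw.1, htw.2]
      · have hcf : PySem.Chars.isalnum c = false := Bool.eq_false_iff.mpr hc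
        simp only [List.cons_append, pvToks, hcf, Bool.false_eq_true, if_false]
        exact ih l suf hlen hs

theorem pv_toks_lstrip (l : List Char) :
    pvToks (l.dropWhile PySem.Chars.isspace) = pvToks l := by
  induction l with
  | nil => rfl
  | cons c l ih =>
    by_cases hc : PySem.Chars.isspace c = true
    · rw [List.dropWhile_cons_of_pos hc, ih, pv_toks_space_cons c l hc]
    · rw [List.dropWhile_cons_of_neg (by simp_all)]

theorem pv_toks_strip (l : List Char) : pvToks (PySem.Chars.strip l) = pvToks l := by
  unfold PySem.Chars.strip PySem.Chars.lstrip PySem.Chars.rstrip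
  rw [← pv_toks_lstrip l]
  set m := l.dropWhile PySem.Chars.isspace with hm
  have hsplit : (m.reverse.dropWhile PySem.Chars.isspace).reverse ++
      (m.reverse.takeWhile PySem.Chars.isspace).reverse = m := by
    rw [← List.reverse_append,
      ← List.takeWhile_append_dropWhile (p := PySem.Chars.isspace) (l := m.reverse)]
    simp
  have hsuf : ∀ c ∈ (m.reverse.takeWhile PySem.Chars.isspace).reverse,
      PySem.Chars.isspace c = true := by
    intro c hc
    exact List.mem_takeWhile_imp (by simpa using hc)
  calc pvToks ((m.reverse.dropWhile PySem.Chars.isspace).reverse)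
      = pvToks ((m.reverse.dropWhile PySem.Chars.isspace).reverse ++
          (m.reverse.takeWhile PySem.Chars.isspace).reverse) :=
        (pv_toks_append_space ((m.reverse.dropWhile PySem.Chars.isspace).reverse.length)
          _ _ (le_refl _) hsuf).symm
    _ = pvToks m := by rw [hsplit]

-- B's fold computes the lowered runs
theorem pv_fold_spec (l : List Char) : ∀ acc run,
    (let st := l.foldl
      (fun (st : List (List Char) × List Char) c =>
        if PySem.Chars.isalnum c then (st.1, st.2 ++ [PySem.Chars.lowerChar c])
        else if st.2.isEmpty then st
        else (st.1 ++ [st.2], []))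
      (acc, run)
     if st.2.isEmpty then st.1 else st.1 ++ [st.2]) =
      acc ++ (if run.isEmpty then pvToks l |>.map PySem.Chars.lower
              else (run ++ PySem.Chars.lower (l.takeWhile PySem.Chars.isalnum)) ::
                   (pvToks (l.dropWhile PySem.Chars.isalnum)).map PySem.Chars.lower) := by
  induction l with
  | nil =>
    intro acc run
    cases run <;> simp [pvToks, PySem.Chars.lower]
  | cons c l ih =>
    intro acc run
    by_cases hc : PySem.Chars.isalnum c = true
    · simp only [List.foldl_cons, hc, if_pos]
      rw [ih acc (run ++ [PySem.Chars.lowerChar c])]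
      cases run with
      | nil =>
        simp [pvToks, hc, List.takeWhile_cons, List.dropWhile_cons, PySem.Chars.lower]
      | cons r rs =>
        simp [List.takeWhile_cons, List.dropWhile_cons, hc, PySem.Chars.lower]
    · have hcf : PySem.Chars.isalnum c = false := Bool.eq_false_iff.mpr hc
      cases run with
      | nil =>
        simp only [List.foldl_cons, hcf, Bool.false_eq_true, if_false, List.isEmpty_nil, if_pos]
        rw [ih acc []]
        simp [pvToks, hcf, List.takeWhile_cons, List.dropWhile_cons]
      | cons r rs =>
        simp only [List.foldl_cons, hcf, Bool.false_eq_true, if_false, List.isEmpty_cons, if_neg]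
        rw [ih (acc ++ [r :: rs]) []]
        simp [pvToks, hcf, List.takeWhile_cons, List.dropWhile_cons, PySem.Chars.lower]

theorem pv_flatMap_eq (l : List Char) :
    l.foldl (fun acc c => acc ++ (if PySem.Chars.isalnum c && c != '_' then [c] else ['-'])) [] =
      l.flatMap pvSub := by
  have : ∀ init : List Char,
      l.foldl (fun acc c => acc ++ (if PySem.Chars.isalnum c && c != '_' then [c] else ['-'])) init =
        init ++ l.flatMap pvSub := by
    induction l with
    | nil => intro init; simp
    | cons c l ih =>
      intro init
      simp only [List.foldl_cons, List.flatMap_cons, ih]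
      simp [pvSub]
  simpa using this []

-- ===== VERDICT (by name: the statement is the Claim_ definition above) =====
theorem sanitize_species_py_spec : Claim_equal_sanitize_species_py := by
  intro species _
  unfold Spec_sanitize_species_py sanitize_species_py sanitize_species_py_alt
  simp only [PySem.Str.toList_strip]
  rw [pv_flatMap_eq, pv_splitOn_eq]
  rw [(pv_filter_split (PySem.Chars.strip species.toList).length _ (le_refl _)).1]
  rw [pv_toks_strip]
  have hB := pv_fold_spec species.toList [] []
  simp only [List.isEmpty_nil, if_pos, List.nil_append] at hB
  rw [hB]
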